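-- pv_equiv track=rewrite | github.com/league3236/MyNewAlgorithmStudy | buzzbil4.py | maxInversions
-- ===== SOURCE A (Python) =====
-- def maxInversions(arr):
--     # Write your code here
--     answer = 0
--     len_arr = len(arr)
--     for i in range(len_arr):
--         for j in range(i+1,len_arr):
--             for k in range(j+1,len_arr):
--                 if arr[i] >= arr[j] and arr[j] >= arr[k]:
--                     answer += 1
--     return answer
-- ===== SOURCE B (Python) =====
-- def maxInversions(arr):
--     n = len(arr)
--     answer = 0
--     for j in range(n):
--         left = 0
--         for i in range(j):
--             if arr[i] >= arr[j]:
--                 left += 1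
--         right = 0
--         for k in range(j + 1, n):
--             if arr[j] >= arr[k]:
--                 right += 1
--         answer += left * right
--     return answer
-- ===== Notes on version B (the rewrite author's own statement) =====
-- stated objective: faster
-- what changed: Instead of enumerating all triples i<j<k in a cubic triple loop, B fixes each middle element j, counts elements >= arr[j] on its left and elements <= arr[j] on its right in single passes, and sums the products.
import Mathlib
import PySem

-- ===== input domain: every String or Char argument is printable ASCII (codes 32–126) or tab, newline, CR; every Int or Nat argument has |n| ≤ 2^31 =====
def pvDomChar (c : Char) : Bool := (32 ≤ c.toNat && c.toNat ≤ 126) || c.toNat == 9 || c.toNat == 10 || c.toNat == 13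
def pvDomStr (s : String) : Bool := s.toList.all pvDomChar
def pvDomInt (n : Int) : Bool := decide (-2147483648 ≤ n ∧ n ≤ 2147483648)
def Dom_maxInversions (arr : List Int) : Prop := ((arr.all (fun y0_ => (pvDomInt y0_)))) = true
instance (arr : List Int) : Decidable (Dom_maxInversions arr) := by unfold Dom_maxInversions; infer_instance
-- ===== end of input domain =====

-- B replaces A's cubic enumeration of all triples i<j<k by, for each middle index j,
-- counting left elements ≥ arr[j] and right elements ≤ arr[j] and summing the products
-- (objective: faster, O(n^2) instead of O(n^3)).

-- ===== PORT A =====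
def maxInversions (arr : List Int) : Int :=
  let lenArr : Int := arr.length
  (PySem.List.pyRange 0 lenArr 1).foldl (fun answer i =>
    (PySem.List.pyRange (i + 1) lenArr 1).foldl (fun answer j =>
      (PySem.List.pyRange (j + 1) lenArr 1).foldl (fun answer k =>
        if PySem.List.pyGetD arr i 0 ≥ PySem.List.pyGetD arr j 0 ∧
           PySem.List.pyGetD arr j 0 ≥ PySem.List.pyGetD arr k 0
        then answer + 1 else answer) answer) answer) 0

-- ===== PORT B =====
def maxInversions_alt (arr : List Int) : Int :=
  let n : Int := arr.length
  (PySem.List.pyRange 0 n 1).foldl (fun answer j =>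
    let left := (PySem.List.pyRange 0 j 1).foldl (fun acc i =>
      if PySem.List.pyGetD arr i 0 ≥ PySem.List.pyGetD arr j 0 then acc + 1 else acc) 0
    let right := (PySem.List.pyRange (j + 1) n 1).foldl (fun acc k =>
      if PySem.List.pyGetD arr j 0 ≥ PySem.List.pyGetD arr k 0 then acc + 1 else acc) 0
    answer + left * right) 0

-- ===== PRECONDITION & SPEC =====
def Spec_maxInversions (arr : List Int) (out : Int) : Prop := out = maxInversions_alt arr
instance (arr : List Int) (out : Int) : Decidable (Spec_maxInversions arr out) := by unfold Spec_maxInversions; infer_instance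

-- ===== CLAIM (what is proved, stated in full; the proofs are below) =====
def Claim_equal_maxInversions : Prop := ∀ (arr : List Int), Dom_maxInversions arr → Spec_maxInversions arr (maxInversions arr)

-- ===== LEMMAS AND PROOFS =====

-- comparison indicator: 1 if arr[i] >= arr[j] (Nat indices), else 0
def pvF (arr : List Int) (i j : ℕ) : Int :=
  if PySem.List.pyGetD arr (i : Int) 0 ≥ PySem.List.pyGetD arr (j : Int) 0 then 1 else 0

theorem pv_foldl_add_pyRange (a b : ℕ) (f : Int → Int) (init : Int) :
    (PySem.List.pyRange (a : Int) (b : Int) 1).foldl (fun acc x => acc + f x) init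
      = init + ∑ k ∈ Finset.Ico a b, f (k : Int) := by
  rw [PySem.List.foldl_add]
  congr 1
  induction b with
  | zero =>
      rw [PySem.List.pyRange_one_eq_nil (by omega)]
      simp
  | succ b ih =>
      by_cases hab : a ≤ b
      · rw [show ((b + 1 : ℕ) : Int) = (b : Int) + 1 by push_cast; ring,
            PySem.List.pyRange_one_succ_right (by omega),
            List.map_append, List.sum_append, Finset.sum_Ico_succ_top hab, ih]
        simp
      · rw [PySem.List.pyRange_one_eq_nil (by omega), Finset.Ico_eq_empty (by omega)]
        simp

theorem pv_foldl_ite_pyRange (a b : ℕ) (P : Int → Prop) [DecidablePred P] (init : Int) :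
    (PySem.List.pyRange (a : Int) (b : Int) 1).foldl
        (fun acc x => if P x then acc + 1 else acc) init
      = init + ∑ k ∈ Finset.Ico a b, (if P (k : Int) then (1 : Int) else 0) := by
  rw [show (fun (acc : Int) x => if P x then acc + 1 else acc)
        = (fun (acc : Int) x => acc + if P x then (1 : Int) else 0) from
      funext fun acc => funext fun x => by split <;> simp]
  exact pv_foldl_add_pyRange a b _ init

theorem pv_ite_and (P Q : Prop) [Decidable P] [Decidable Q] :
    (if P ∧ Q then (1 : Int) else 0) = (if P then (1 : Int) else 0) * (if Q then (1 : Int) else 0) := by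
  by_cases hP : P <;> by_cases hQ : Q <;> simp [hP, hQ]

theorem pvA_sum (arr : List Int) :
    maxInversions arr
      = ∑ i ∈ Finset.range arr.length, ∑ j ∈ Finset.Ico (i + 1) arr.length,
          ∑ k ∈ Finset.Ico (j + 1) arr.length, pvF arr i j * pvF arr j k := by
  unfold maxInversions
  set n := arr.length with hn
  rw [PySem.List.foldl_congr_mem _ _
      (fun acc i => acc + ∑ j ∈ Finset.Ico (i.toNat + 1) n,
          ∑ k ∈ Finset.Ico (j + 1) n, pvF arr i.toNat j * pvF arr j k) _ ?_]
  · have := pv_foldl_add_pyRange 0 n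
      (fun i => ∑ j ∈ Finset.Ico (i.toNat + 1) n,
          ∑ k ∈ Finset.Ico (j + 1) n, pvF arr i.toNat j * pvF arr j k) 0
    simp only [Nat.cast_zero] at this
    rw [this, zero_add, Finset.range_eq_Ico]
    exact Finset.sum_congr rfl (fun i _ => by simp)
  · intro acc i hi
    rw [PySem.List.mem_pyRange_one] at hi
    have hi0 : (i.toNat : Int) = i := by omega
    rw [PySem.List.foldl_congr_mem _ _
        (fun acc j => acc + ∑ k ∈ Finset.Ico (j.toNat + 1) n,
            pvF arr i.toNat j.toNat * pvF arr j.toNat k) _ ?_]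
    · have hcast : (i : Int) + 1 = ((i.toNat + 1 : ℕ) : Int) := by omega
      rw [hcast]
      have := pv_foldl_add_pyRange (i.toNat + 1) n
          (fun j => ∑ k ∈ Finset.Ico (j.toNat + 1) n,
              pvF arr i.toNat j.toNat * pvF arr j.toNat k) acc
      rw [this]
      simp
    · intro acc j hj
      rw [PySem.List.mem_pyRange_one] at hj
      have hj0 : (j.toNat : Int) = j := by omega
      have hcast : (j : Int) + 1 = ((j.toNat + 1 : ℕ) : Int) := by omega
      rw [hcast, pv_foldl_ite_pyRange (j.toNat + 1) n
          (fun k => PySem.List.pyGetD arr i 0 ≥ PySem.List.pyGetD arr j 0 ∧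
                    PySem.List.pyGetD arr j 0 ≥ PySem.List.pyGetD arr k 0) acc]
      congr 1
      refine Finset.sum_congr rfl (fun k _ => ?_)
      rw [pv_ite_and]
      unfold pvF
      rw [hi0, hj0]

theorem pvB_sum (arr : List Int) :
    maxInversions_alt arr
      = ∑ j ∈ Finset.range arr.length,
          (∑ i ∈ Finset.Ico 0 j, pvF arr i j) * (∑ k ∈ Finset.Ico (j + 1) arr.length, pvF arr j k) := by
  unfold maxInversions_alt
  set n := arr.length with hn
  rw [PySem.List.foldl_congr_mem _ _
      (fun acc j => acc +
        (∑ i ∈ Finset.Ico 0 j.toNat, pvF arr i j.toNat) *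
        (∑ k ∈ Finset.Ico (j.toNat + 1) n, pvF arr j.toNat k)) _ ?_]
  · have := pv_foldl_add_pyRange 0 n
      (fun j => (∑ i ∈ Finset.Ico 0 j.toNat, pvF arr i j.toNat) *
        (∑ k ∈ Finset.Ico (j.toNat + 1) n, pvF arr j.toNat k)) 0
    simp only [Nat.cast_zero] at this
    rw [this, zero_add, Finset.range_eq_Ico]
    exact Finset.sum_congr rfl (fun j _ => by simp)
  · intro acc j hj
    rw [PySem.List.mem_pyRange_one] at hj
    have hj0 : (j.toNat : Int) = j := by omega
    simp only []
    have hleft : (PySem.List.pyRange 0 j 1).foldl (fun acc i =>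
        if PySem.List.pyGetD arr i 0 ≥ PySem.List.pyGetD arr j 0 then acc + 1 else acc) 0
        = ∑ i ∈ Finset.Ico 0 j.toNat, pvF arr i j.toNat := by
      have h := pv_foldl_ite_pyRange 0 j.toNat
          (fun i => PySem.List.pyGetD arr i 0 ≥ PySem.List.pyGetD arr j 0) 0
      simp only [Nat.cast_zero, hj0] at h
      rw [h, zero_add]
      refine Finset.sum_congr rfl (fun i _ => ?_)
      unfold pvF
      rw [hj0]
    have hright : (PySem.List.pyRange (j + 1) (n : Int) 1).foldl (fun acc k =>
        if PySem.List.pyGetD arr j 0 ≥ PySem.List.pyGetD arr k 0 then acc + 1 else acc) 0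
        = ∑ k ∈ Finset.Ico (j.toNat + 1) n, pvF arr j.toNat k := by
      have h := pv_foldl_ite_pyRange (j.toNat + 1) n
          (fun k => PySem.List.pyGetD arr j 0 ≥ PySem.List.pyGetD arr k 0) 0
      have hcast : ((j.toNat + 1 : ℕ) : Int) = j + 1 := by omega
      rw [hcast] at h
      rw [h, zero_add]
      refine Finset.sum_congr rfl (fun k _ => ?_)
      unfold pvF
      rw [hj0]
    rw [hleft, hright]

-- ===== VERDICT (by name: the statement is the Claim_ definition above) =====
theorem maxInversions_spec : Claim_equal_maxInversions := by
  intro arr _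
  unfold Spec_maxInversions
  rw [pvA_sum, pvB_sum]
  set n := arr.length with hn
  rw [Finset.range_eq_Ico,
      Finset.sum_Ico_Ico_comm' 0 n
        (fun i j => ∑ k ∈ Finset.Ico (j + 1) n, pvF arr i j * pvF arr j k)]
  refine Finset.sum_congr rfl (fun j _ => ?_)
  rw [Finset.sum_mul]
  refine Finset.sum_congr rfl (fun i _ => ?_)
  rw [Finset.mul_sum]
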